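-- pv_equiv track=rewrite | github.com/LucyyyyyyT/markdown-compiler | markdown_compiler/util/line_functions.py | compile_strikethrough
-- ===== SOURCE A (Python) =====
-- def compile_strikethrough(line):
--     result = ""
--     i = 0
--
--     while i < len(line):
--         if line[i:i + 2] == "~~" and line.find("~~", i + 2) != -1:
--             end = line.find("~~", i + 2)
--             result += "<ins>" + line[i + 2:end] + "</ins>"
--             i = end + 2
--         else:
--             result += line[i]
--             i += 1
--
--     return result
-- ===== SOURCE B (Python) =====
-- def compile_strikethrough(line):
--     tokens = line.split("~~")
--     parts = [tokens[0]]
--     i = 1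
--     while i < len(tokens):
--         if i + 1 < len(tokens):
--             parts.append("<ins>" + tokens[i] + "</ins>" + tokens[i + 1])
--             i += 2
--         else:
--             parts.append("~~" + tokens[i])
--             i += 1
--     return "".join(parts)
-- ===== Notes on version B (the rewrite author's own statement) =====
-- stated objective: faster
-- what changed: Replaces the char-by-char index scan that re-runs find on every step (quadratic on tilde-free text) by a single split on the delimiter followed by a pairwise reconstruction of the tokens (wrap every odd token, re-emit an unmatched trailing delimiter literally).
import Mathlib
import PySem

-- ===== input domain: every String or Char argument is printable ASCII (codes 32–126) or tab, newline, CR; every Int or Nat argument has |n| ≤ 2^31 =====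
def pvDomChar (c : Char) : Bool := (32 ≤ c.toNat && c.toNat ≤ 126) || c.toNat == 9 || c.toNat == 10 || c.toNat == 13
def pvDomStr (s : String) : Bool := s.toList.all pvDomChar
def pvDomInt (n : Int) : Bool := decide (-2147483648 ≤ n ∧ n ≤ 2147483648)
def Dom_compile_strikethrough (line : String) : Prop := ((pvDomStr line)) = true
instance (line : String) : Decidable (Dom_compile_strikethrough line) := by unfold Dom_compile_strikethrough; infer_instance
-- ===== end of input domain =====

-- B replaces A's char-by-char index scan (with a find on each step) by one split on "~~"
-- followed by a pairwise reconstruction of the tokens (objective: idiomatic).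

-- ===== PORT A =====
-- A's while loop over the index i, ported over the suffix line.drop i (exact: the
-- slice line[i:i+2] is the suffix's take 2, and line.find("~~", i+2) relative to
-- position i+2 is Chars.find on the suffix dropped by 2; indices shift accordingly).
def pvLoopA : List Char → List Char
  | [] => []                                   -- while-loop exit: i = len(line)
  | c :: rest =>
    if (c :: rest).take 2 = ['~', '~'] ∧ PySem.Chars.find (rest.drop 1) ['~', '~'] ≠ -1 then
      -- end relative to i+2; line[i+2:end] = (suffix.drop 2).take e; next i = end+2
      let e := (PySem.Chars.find (rest.drop 1) ['~', '~']).toNat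
      "<ins>".toList ++ (rest.drop 1).take e ++ "</ins>".toList ++ pvLoopA ((rest.drop 1).drop (e + 2))
    else
      c :: pvLoopA rest
  termination_by l => l.length
  decreasing_by all_goals simp
  -- (the first recursive call drops ≥ 4 elements, the second drops 1)

def compile_strikethrough (line : String) : String := String.ofList (pvLoopA line.toList)

-- ===== PORT B =====
-- Source B's while loop over tokens[1:], two tokens at a time.
def pvGoB : List (List Char) → List Char
  | [] => []
  | [t] => '~' :: '~' :: t                       -- unmatched trailing "~~": re-emit literally
  | t :: u :: rest => "<ins>".toList ++ t ++ "</ins>".toList ++ u ++ pvGoB rest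

def compile_strikethrough_alt (line : String) : String :=
  -- line.split("~~") = Chars.splitOn (sep nonempty, so split never raises and is never empty)
  match PySem.Chars.splitOn line.toList ['~', '~'] with
  | [] => ""                                     -- unreachable: splitOn always returns ≥ 1 token
  | t :: rest => String.ofList (t ++ pvGoB rest)

-- ===== PRECONDITION & SPEC =====
def Spec_compile_strikethrough (line : String) (out : String) : Prop := out = compile_strikethrough_alt line
instance (line : String) (out : String) : Decidable (Spec_compile_strikethrough line out) := by unfold Spec_compile_strikethrough; infer_instance

-- ===== CLAIM (what is proved, stated in full; the proofs are below) =====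
def Claim_equal_compile_strikethrough : Prop := ∀ (line : String), Dom_compile_strikethrough line → Spec_compile_strikethrough line (compile_strikethrough line)

-- ===== LEMMAS AND PROOFS =====

-- proof-only reference splitter: the token list of Chars.splitOn, in direct recursion
def pvSplitT : List Char → List (List Char)
  | [] => [[]]
  | c :: rest =>
    if ['~', '~'].isPrefixOf (c :: rest) then [] :: pvSplitT (rest.drop 1)
    else (pvSplitT rest).modifyHead (c :: ·)
  termination_by l => l.length
  decreasing_by all_goals simp

def pvRender : List (List Char) → List Char
  | [] => []
  | t :: rest => t ++ pvGoB rest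

theorem pvSplitT_ne_nil (l : List Char) : pvSplitT l ≠ [] := by
  match l with
  | [] => simp [pvSplitT]
  | c :: rest =>
    rw [pvSplitT]
    split_ifs with h
    · simp
    · cases hr : pvSplitT rest with
      | nil => exact absurd hr (pvSplitT_ne_nil rest)
      | cons a r => simp
  termination_by l.length
  decreasing_by simp

theorem pv_go_prefix (c : Char) (rest : List Char) (k : Nat)
    (hp : ['~', '~'].isPrefixOf (c :: rest) = true) :
    PySem.Chars.find.go ['~', '~'] (c :: rest) k = k := by
  rw [PySem.Chars.find.go]; simp [hp]

theorem pv_go_cons (c : Char) (rest : List Char) (k : Nat)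
    (hp : ¬ ['~', '~'].isPrefixOf (c :: rest) = true) :
    PySem.Chars.find.go ['~', '~'] (c :: rest) k = PySem.Chars.find.go ['~', '~'] rest (k + 1) := by
  rw [PySem.Chars.find.go]; simp [hp]

theorem pv_go_ge (l : List Char) (k : Nat) : -1 ≤ PySem.Chars.find.go ['~', '~'] l k := by
  induction l generalizing k with
  | nil => simp [PySem.Chars.find.go]
  | cons c rest ih =>
    rw [PySem.Chars.find.go]
    split_ifs <;> [omega; exact ih (k + 1)]

theorem pv_find_go_offset (l : List Char) (k : Nat) :
    PySem.Chars.find.go ['~', '~'] l k =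
      if PySem.Chars.find.go ['~', '~'] l 0 = -1 then -1
      else PySem.Chars.find.go ['~', '~'] l 0 + k := by
  induction l generalizing k with
  | nil => simp [PySem.Chars.find.go]
  | cons c rest ih =>
    by_cases hp : ['~', '~'].isPrefixOf (c :: rest) = true
    · rw [pv_go_prefix c rest k hp, pv_go_prefix c rest 0 hp]
      simp
    · rw [pv_go_cons c rest k hp, pv_go_cons c rest 0 hp, ih (k + 1), ih 1]
      have := pv_go_ge rest 0
      split_ifs <;> omega

theorem pv_find_of_prefix (l : List Char) (h : ['~', '~'].isPrefixOf l = true) :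
    PySem.Chars.find l ['~', '~'] = 0 := by
  cases l with
  | nil => simp [List.isPrefixOf] at h
  | cons c rest =>
    unfold PySem.Chars.find
    rw [PySem.Chars.find.go]
    simp [h]

theorem pv_find_cons (c : Char) (rest : List Char) (h : ¬ ['~', '~'].isPrefixOf (c :: rest) = true) :
    PySem.Chars.find (c :: rest) ['~', '~'] =
      if PySem.Chars.find rest ['~', '~'] = -1 then -1
      else PySem.Chars.find rest ['~', '~'] + 1 := by
  unfold PySem.Chars.find
  rw [pv_go_cons c rest 0 h]
  exact pv_find_go_offset rest 1

theorem pv_splitOn_go_eq (fuel : Nat) (l cur : List Char) (acc : List (List Char))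
    (hf : l.length ≤ fuel) :
    PySem.Chars.splitOn.go ['~', '~'] fuel l cur acc =
      acc.reverse ++ (pvSplitT l).modifyHead (cur.reverse ++ ·) := by
  induction fuel generalizing l cur acc with
  | zero =>
    have : l = [] := by cases l <;> simp_all
    subst this
    simp [PySem.Chars.splitOn.go, pvSplitT]
  | succ n ih =>
    cases l with
    | nil => simp [PySem.Chars.splitOn.go, pvSplitT]
    | cons c rest =>
      by_cases hp : ['~', '~'].isPrefixOf (c :: rest) = true
      · have hlen : (List.drop (['~', '~'] : List Char).length (c :: rest)).length ≤ n := by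
          simp at hf ⊢; omega
        rw [PySem.Chars.splitOn.go]
        simp only [hp, if_true]
        rw [ih _ _ _ hlen, pvSplitT]
        simp only [hp, if_true, List.drop_one]
        have hd : List.drop (['~', '~'] : List Char).length (c :: rest) = rest.tail := by simp
        rw [hd]
        cases hr : pvSplitT rest.tail with
        | nil => exact absurd hr (pvSplitT_ne_nil _)
        | cons a r => simp [List.modifyHead]
      · have hlen : rest.length ≤ n := by simp at hf; omega
        rw [PySem.Chars.splitOn.go]
        simp only [hp]
        rw [ih _ _ _ hlen, pvSplitT]
        simp only [hp]
        cases hr : pvSplitT rest with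
        | nil => exact absurd hr (pvSplitT_ne_nil rest)
        | cons a r => simp [List.modifyHead]

theorem pv_splitOn_eq (l : List Char) :
    PySem.Chars.splitOn l ['~', '~'] = pvSplitT l := by
  unfold PySem.Chars.splitOn
  rw [pv_splitOn_go_eq _ _ _ _ (by omega)]
  cases hr : pvSplitT l with
  | nil => exact absurd hr (pvSplitT_ne_nil l)
  | cons a r => simp [List.modifyHead]

theorem pv_prefix_iff_take (l : List Char) :
    ['~', '~'].isPrefixOf l = true ↔ l.take 2 = ['~', '~'] := by
  match l with
  | [] => simp [List.isPrefixOf]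
  | [c] => simp [List.isPrefixOf]
  | c :: d :: rest =>
    simp [List.isPrefixOf]
    constructor <;> exact fun ⟨a, b⟩ => ⟨a.symm, b.symm⟩

theorem pv_splitT_neg (l : List Char) (h : PySem.Chars.find l ['~', '~'] = -1) :
    pvSplitT l = [l] := by
  match l with
  | [] => simp [pvSplitT]
  | c :: rest =>
    by_cases hp : ['~', '~'].isPrefixOf (c :: rest) = true
    · rw [pv_find_of_prefix _ hp] at h; simp at h
    · have hrest : PySem.Chars.find rest ['~', '~'] = -1 := by
        rw [pv_find_cons c rest hp] at h
        by_contra hne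
        have := pv_go_ge rest 0
        simp [hne] at h
        unfold PySem.Chars.find at *
        omega
      rw [pvSplitT]
      simp only [hp]
      rw [pv_splitT_neg rest hrest]
      simp [List.modifyHead]
  termination_by l.length
  decreasing_by simp

theorem pv_splitT_pos (l : List Char) (h : PySem.Chars.find l ['~', '~'] ≠ -1) :
    pvSplitT l = l.take (PySem.Chars.find l ['~', '~']).toNat ::
      pvSplitT (l.drop ((PySem.Chars.find l ['~', '~']).toNat + 2)) := by
  match l with
  | [] =>
    exfalso; apply h
    unfold PySem.Chars.find; rw [PySem.Chars.find.go]; simp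
  | c :: rest =>
    by_cases hp : ['~', '~'].isPrefixOf (c :: rest) = true
    · rw [pv_find_of_prefix _ hp]
      rw [pvSplitT]
      simp only [hp, if_true]
      simp
    · have hrest : PySem.Chars.find rest ['~', '~'] ≠ -1 := by
        intro hr
        rw [pv_find_cons c rest hp, hr] at h
        simp at h
      have hge : 0 ≤ PySem.Chars.find rest ['~', '~'] := by
        have := pv_go_ge rest 0
        unfold PySem.Chars.find at *
        omega
      have hfc : PySem.Chars.find (c :: rest) ['~', '~'] = PySem.Chars.find rest ['~', '~'] + 1 := by
        rw [pv_find_cons c rest hp]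
        simp [hrest]
      rw [pvSplitT]
      simp only [hp]
      rw [pv_splitT_pos rest hrest, hfc]
      have htn : (PySem.Chars.find rest ['~', '~'] + 1).toNat =
          (PySem.Chars.find rest ['~', '~']).toNat + 1 := by omega
      simp [htn, List.modifyHead]
  termination_by l.length
  decreasing_by simp

theorem pv_render_tilde (t : List Char) (h : PySem.Chars.find t ['~', '~'] = -1) :
    pvRender (pvSplitT ('~' :: t)) = '~' :: t := by
  by_cases hp : ['~', '~'].isPrefixOf ('~' :: t) = true
  · obtain ⟨t2, ht⟩ : ∃ t2, t = '~' :: t2 := by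
      have := (pv_prefix_iff_take ('~' :: t)).mp hp
      cases t with
      | nil => simp at this
      | cons d r => simp at this; exact ⟨r, by simp [this]⟩
    subst ht
    have hp2 : ¬ ['~', '~'].isPrefixOf ('~' :: t2) = true := by
      intro hpp
      rw [pv_find_of_prefix _ hpp] at h; simp at h
    have ht2 : PySem.Chars.find t2 ['~', '~'] = -1 := by
      rw [pv_find_cons _ _ hp2] at h
      by_contra hne
      have := pv_go_ge t2 0
      simp [hne] at h
      unfold PySem.Chars.find at *
      omega
    rw [pvSplitT]
    simp only [hp, if_true, List.drop_one, List.tail_cons]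
    rw [pv_splitT_neg t2 ht2]
    simp [pvRender, pvGoB]
  · have hfull : PySem.Chars.find ('~' :: t) ['~', '~'] = -1 := by
      rw [pv_find_cons _ _ hp, h]
      simp
    rw [pv_splitT_neg _ hfull]
    simp [pvRender, pvGoB]

theorem pv_main (l : List Char) : pvLoopA l = pvRender (pvSplitT l) := by
  match l with
  | [] => simp [pvLoopA, pvSplitT, pvRender, pvGoB]
  | c :: rest =>
    by_cases hc : (c :: rest).take 2 = ['~', '~'] ∧ PySem.Chars.find (rest.drop 1) ['~', '~'] ≠ -1
    · obtain ⟨h1, h2⟩ := hc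
      have hp : ['~', '~'].isPrefixOf (c :: rest) = true := (pv_prefix_iff_take _).mpr h1
      simp only [List.drop_one] at h2
      rw [pvLoopA]
      simp only [List.drop_one, h1, h2, ne_eq, not_false_iff, and_self, if_true]
      rw [pvSplitT]
      simp only [hp, if_true, List.drop_one]
      rw [pv_splitT_pos _ h2]
      cases hS : pvSplitT (rest.tail.drop ((PySem.Chars.find rest.tail ['~', '~']).toNat + 2)) with
      | nil => exact absurd hS (pvSplitT_ne_nil _)
      | cons s more =>
        have ih := pv_main (rest.tail.drop ((PySem.Chars.find rest.tail ['~', '~']).toNat + 2))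
        rw [hS] at ih
        have harg : rest.tail.drop ((PySem.Chars.find rest.tail ['~', '~']).toNat + 2) =
            List.drop ((PySem.Chars.find rest.tail ['~', '~']).toNat + 2 + 1) rest := by
          rw [← List.drop_one (l := rest), List.drop_drop]; congr 1; omega
        rw [harg] at ih
        simp [pvRender, pvGoB, ih]
    · rw [pvLoopA]
      simp only [hc, if_false]
      have ih := pv_main rest
      by_cases hp : ['~', '~'].isPrefixOf (c :: rest) = true
      · have h1 : (c :: rest).take 2 = ['~', '~'] := (pv_prefix_iff_take _).mp hp
        have h2 : PySem.Chars.find (rest.drop 1) ['~', '~'] = -1 := by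
          by_contra hne
          exact hc ⟨h1, hne⟩
        obtain ⟨t, ht⟩ : ∃ t, rest = '~' :: t := by
          cases rest with
          | nil => simp at h1
          | cons d r => simp at h1; exact ⟨r, by simp [h1]⟩
        have hcs : c = '~' := by
          cases rest <;> simp_all
        subst ht hcs
        simp only [List.drop_one, List.tail_cons] at h2
        rw [pvSplitT]
        simp only [hp, if_true, List.drop_one, List.tail_cons]
        rw [pv_splitT_neg t h2, ih, pv_render_tilde t h2]
        simp [pvRender, pvGoB]
      · rw [pvSplitT]
        simp only [hp]
        cases hr : pvSplitT rest with
        | nil => exact absurd hr (pvSplitT_ne_nil rest)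
        | cons a r =>
          rw [ih, hr]
          simp [pvRender, List.modifyHead]
  termination_by l.length
  decreasing_by all_goals (simp; try omega)

-- ===== VERDICT (by name: the statement is the Claim_ definition above) =====
theorem compile_strikethrough_spec : Claim_equal_compile_strikethrough := by
  intro line _
  unfold Spec_compile_strikethrough compile_strikethrough compile_strikethrough_alt
  rw [pv_splitOn_eq, pv_main line.toList]
  cases hr : pvSplitT line.toList with
  | nil => exact absurd hr (pvSplitT_ne_nil _)
  | cons a r => simp [pvRender]
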